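-- pv_equiv track=rewrite | github.com/gigamonkey/wip | server.py | read_todo_description
-- ===== SOURCE A (Python) =====
-- def read_todo_description(text):
--     """Extract description from between the first # heading and first ## heading."""
--     if not text:
--         return ""
--     desc_lines = []
--     in_body = False
--     for line in text.splitlines():
--         if not in_body:
--             if line.startswith("# "):
--                 in_body = True
--             continue
--         if line.startswith("## "):
--             break
--         desc_lines.append(line)
--     return "\n".join(desc_lines).strip()
-- ===== SOURCE B (Python) =====
-- def read_todo_description(text):
--     """Extract description from between the first # heading and first ## heading."""
--     # normalize all line breaks to '\n', then work on the raw string with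
--     # substring partitioning instead of scanning a list of lines
--     s = "\n".join(text.splitlines())
--     _, sep, rest = ("\n" + s).partition("\n# ")
--     if not sep:
--         return ""
--     body = rest.partition("\n")[2]
--     return ("\n" + body).partition("\n## ")[0].strip()
-- ===== Notes on version B (the rewrite author's own statement) =====
-- stated objective: alternative
-- what changed: Replaces A's per-line scan with an in_body flag accumulator by raw-string substring partitioning: normalize line breaks via join(splitlines()), then partition the text itself at the first level-1 heading marker, the end of that heading line, and the first level-2 heading marker, with no loop over a list of lines at all.
import Mathlib
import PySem

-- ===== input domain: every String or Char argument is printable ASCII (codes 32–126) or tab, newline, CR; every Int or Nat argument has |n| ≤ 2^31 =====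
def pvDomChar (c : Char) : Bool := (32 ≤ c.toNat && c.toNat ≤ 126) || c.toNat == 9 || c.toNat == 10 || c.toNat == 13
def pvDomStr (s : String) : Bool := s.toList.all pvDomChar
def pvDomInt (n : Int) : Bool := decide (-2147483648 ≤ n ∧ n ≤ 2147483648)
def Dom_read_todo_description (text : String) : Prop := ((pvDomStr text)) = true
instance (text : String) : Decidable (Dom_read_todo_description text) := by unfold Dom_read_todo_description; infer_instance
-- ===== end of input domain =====

-- B replaces A's flag-driven per-line scan by raw-string substring partitioning on '\n'-normalized text; same cost, a different algorithm (no loop over lines).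


-- ===== PORT A =====
-- A's loop over the lines: state = in_body flag; 'break' returns the accumulator built so far.
def pvLoopA : List (List Char) → Bool → List (List Char)
  | [], _ => []
  | l :: rest, false =>
      if PySem.Chars.startswith l "# ".toList then pvLoopA rest true else pvLoopA rest false
  | l :: rest, true =>
      if PySem.Chars.startswith l "## ".toList then [] else l :: pvLoopA rest true

def read_todo_description (text : String) : String :=
  if text = "" then ""
  else String.ofList (PySem.Chars.strip
        (PySem.Chars.join ['\n'] (pvLoopA (PySem.Chars.splitlines text.toList) false)))

-- ===== PORT B =====
-- Source B works on the raw string; str.partition(sep) is ported exactly as find + slicing on code points.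
def read_todo_description_alt (text : String) : String :=
  let s : List Char := PySem.Chars.join ['\n'] (PySem.Chars.splitlines text.toList)  -- "\n".join(text.splitlines())
  let t : List Char := '\n' :: s                                                     -- "\n" + s
  let i := PySem.Chars.find t "\n# ".toList                                          -- ("\n"+s).partition("\n# ")
  if i = -1 then ""                                                                  -- sep empty: no "\n# "
  else
    let rest := t.drop (i.toNat + 3)                                                 -- the part after "\n# "
    let j := PySem.Chars.find rest ['\n']                                            -- rest.partition("\n")[2]
    let body := if j = -1 then [] else rest.drop (j.toNat + 1)
    let u : List Char := '\n' :: body                                                -- "\n" + body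
    let k := PySem.Chars.find u "\n## ".toList                                       -- ("\n"+body).partition("\n## ")[0]
    String.ofList (PySem.Chars.strip (if k = -1 then u else u.take k.toNat))

-- ===== PRECONDITION & SPEC =====
def Spec_read_todo_description (text : String) (out : String) : Prop := out = read_todo_description_alt text
instance (text : String) (out : String) : Decidable (Spec_read_todo_description text out) := by unfold Spec_read_todo_description; infer_instance

-- ===== CLAIM (what is proved, stated in full; the proofs are below) =====
def Claim_equal_read_todo_description : Prop := ∀ (text : String), Dom_read_todo_description text → Spec_read_todo_description text (read_todo_description text)

-- ===== LEMMAS AND PROOFS =====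

theorem pvSplitGo_nobreak (isB : Char → Bool) :
    ∀ (s cur : List Char) (acc : List (List Char)),
      (∀ c ∈ cur, isB c = false) → (∀ l ∈ acc, ∀ c ∈ l, isB c = false) →
      ∀ l ∈ PySem.Chars.splitlines.go isB s cur acc, ∀ c ∈ l, isB c = false := by
  intro s cur acc
  induction s, cur, acc using PySem.Chars.splitlines.go.induct (isB := isB) with
  | case1 cur acc hc =>
      intro h1 h2
      simpa [PySem.Chars.splitlines.go, hc] using h2
  | case2 cur acc hc =>
      intro h1 h2
      simp only [PySem.Chars.splitlines.go, if_neg hc]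
      intro l hl
      rcases (by simpa using hl : l ∈ acc ∨ l = cur.reverse) with hl' | rfl
      · exact h2 l hl'
      · intro c hc'; exact h1 c (by simpa using hc')
  | case3 rest cur acc ih =>
      intro h1 h2
      simp only [PySem.Chars.splitlines.go]
      exact ih (by simp) (by
        intro l hl c hc'
        rcases List.mem_cons.mp hl with rfl | hl'
        · exact h1 c (by simpa using hc')
        · exact h2 l hl' c hc')
  | case4 c rest cur acc hne hB ih =>
      intro h1 h2
      rw [PySem.Chars.splitlines.go.eq_def]
      split
      · simp_all
      · rename_i rest' heq
        injection heq with e1 e2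
        exact (hne rest' e1 e2).elim
      · rename_i c' rest' hne' heq
        injection heq with e1 e2
        subst e1; subst e2
        rw [if_pos hB]
        exact ih (by simp) (by
          intro l hl c0 hc0
          rcases List.mem_cons.mp hl with rfl | hl'
          · exact h1 c0 (by simpa using hc0)
          · exact h2 l hl' c0 hc0)
  | case5 c rest cur acc hne hB ih =>
      intro h1 h2
      rw [PySem.Chars.splitlines.go.eq_def]
      split
      · simp_all
      · rename_i rest' heq
        injection heq with e1 e2
        exact (hne rest' e1 e2).elim
      · rename_i c' rest' hne' heq
        injection heq with e1 e2
        subst e1; subst e2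
        rw [if_neg hB]
        exact ih (by
          intro c0 hc0
          rcases List.mem_cons.mp hc0 with rfl | hc0'
          · simpa using hB
          · exact h1 c0 hc0') h2

theorem pvSplitlines_nonl (s : List Char) :
    ∀ l ∈ PySem.Chars.splitlines s, '\n' ∉ l := by
  intro l hl hmem
  unfold PySem.Chars.splitlines at hl
  exact absurd (pvSplitGo_nobreak _ s [] [] (by simp) (by simp) l hl '\n' hmem) (by simp)

theorem pvNoPrefix_head (a : Char) (y q : List Char) (ha : a ≠ '\n') :
    ¬ ('\n' :: q) <+: (a :: y) := by
  intro h
  rw [List.cons_prefix_cons] at h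
  exact ha h.1.symm

theorem pvPrefix_append_line (q l w : List Char) (hq : '\n' ∉ q)
    (h : q <+: l ++ '\n' :: w) : q <+: l := by
  rcases le_or_gt q.length l.length with hle | hlt
  · have ht := List.prefix_iff_eq_take.mp h
    rw [List.take_append_of_le_length hle] at ht
    exact ht ▸ List.take_prefix _ _
  · exfalso
    have hll : l.length < (l ++ '\n' :: w).length := by simp
    have hg : q[l.length]'hlt = (l ++ '\n' :: w)[l.length]'hll := h.getElem hlt
    rw [List.getElem_append_right (le_refl _)] at hg
    simp at hg
    exact hq (hg ▸ List.getElem_mem hlt)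

theorem pvJoin_cons (l : List Char) (ls : List (List Char)) (h : ls ≠ []) :
    PySem.Chars.join ['\n'] (l :: ls) = l ++ '\n' :: PySem.Chars.join ['\n'] ls := by
  obtain ⟨a, as, rfl⟩ := List.exists_cons_of_ne_nil h
  simp [PySem.Chars.join, List.intercalate]

theorem pvFind_eq_of (t sub : List Char) (v : Nat)
    (h1 : sub <+: t.drop v) (h2 : ∀ i < v, ¬ sub <+: t.drop i) :
    PySem.Chars.find t sub = (v : Int) := by
  have hin : PySem.Chars.isIn sub t = true :=
    (PySem.Chars.exists_prefix_drop_iff_isIn sub t).mp ⟨v, h1⟩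
  have hnn : 0 ≤ PySem.Chars.find t sub :=
    (PySem.Chars.find_nonneg_iff t sub).mpr ((PySem.Chars.isIn_iff_infix sub t).mp hin)
  obtain ⟨hpre, hmin⟩ := PySem.Chars.find_spec hnn
  have hv : (PySem.Chars.find t sub).toNat = v := by
    by_contra hne
    rcases Nat.lt_or_ge (PySem.Chars.find t sub).toNat v with h | h
    · exact h2 _ h hpre
    · exact hmin v (by omega) h1
  omega

theorem pvFind_none (t sub : List Char) (h : PySem.Chars.find t sub = -1) :
    ∀ i, ¬ sub <+: t.drop i := by
  intro i hi
  have : PySem.Chars.isIn sub t = true :=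
    (PySem.Chars.exists_prefix_drop_iff_isIn sub t).mp ⟨i, hi⟩
  exact absurd ((PySem.Chars.find_eq_neg_one_iff t sub).mp h)
    (fun hn => hn ((PySem.Chars.isIn_iff_infix sub t).mp this))

theorem pvFindChar (q : List Char) (hq : q ≠ []) (hqn : '\n' ∉ q) :
    ∀ ls : List (List Char), (∀ l ∈ ls, '\n' ∉ l) →
      (PySem.Chars.find ('\n' :: PySem.Chars.join ['\n'] ls) ('\n' :: q) = -1
         ∧ ∀ l ∈ ls, ¬ q <+: l)
      ∨ (∃ m : Nat, ∃ hm : m < ls.length, q <+: ls[m]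
         ∧ (∀ i, ∀ hi : i < ls.length, i < m → ¬ q <+: ls[i])
         ∧ 0 ≤ PySem.Chars.find ('\n' :: PySem.Chars.join ['\n'] ls) ('\n' :: q)
         ∧ ('\n' :: PySem.Chars.join ['\n'] ls).take
              (PySem.Chars.find ('\n' :: PySem.Chars.join ['\n'] ls) ('\n' :: q)).toNat
              = (if m = 0 then [] else '\n' :: PySem.Chars.join ['\n'] (ls.take m))
         ∧ ('\n' :: PySem.Chars.join ['\n'] ls).drop
              (PySem.Chars.find ('\n' :: PySem.Chars.join ['\n'] ls) ('\n' :: q)).toNat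
              = '\n' :: PySem.Chars.join ['\n'] (ls.drop m)) := by
  intro ls
  induction ls with
  | nil =>
      intro _
      left
      refine ⟨?_, by simp⟩
      rw [PySem.Chars.find_eq_neg_one_iff]
      intro hinf
      have hle := hinf.length_le
      have hq1 : q.length + 1 ≤ 1 := by
        simpa [PySem.Chars.join, List.intercalate] using hle
      exact hq (List.eq_nil_of_length_eq_zero (by omega))
  | cons l ls' ih =>
      intro hnl
      have hl : '\n' ∉ l := hnl l (by simp)
      have hnl' : ∀ x ∈ ls', '\n' ∉ x := fun x hx => hnl x (by simp [hx])
      by_cases hql : q <+: l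
      · -- first line matches: find = 0
        right
        have hpre0 : ('\n' :: q) <+: ('\n' :: PySem.Chars.join ['\n'] (l :: ls')) := by
          rw [List.cons_prefix_cons]
          refine ⟨rfl, ?_⟩
          rcases eq_or_ne ls' [] with rfl | hne
          · simpa [PySem.Chars.join, List.intercalate] using hql
          · rw [pvJoin_cons l ls' hne]
            exact hql.trans (List.prefix_append _ _)
        have hfind : PySem.Chars.find ('\n' :: PySem.Chars.join ['\n'] (l :: ls')) ('\n' :: q) = ((0 : Nat) : Int) := by
          apply pvFind_eq_of _ _ 0 (by simpa using hpre0)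
          intro i hi; exact absurd hi (by omega)
        refine ⟨0, by simp, by simpa using hql, by intro i hi hlt; omega, ?_, ?_, ?_⟩
        · rw [hfind]; exact Int.le_refl 0
        · rw [hfind]; simp
        · rw [hfind]; simp
      · rcases eq_or_ne ls' [] with rfl | hls'
        · -- single line, no match anywhere
          left
          refine ⟨?_, by simpa using hql⟩
          rw [PySem.Chars.find_eq_neg_one_iff]
          intro hinf
          obtain ⟨i, hi⟩ := (PySem.Chars.exists_prefix_drop_iff_isIn _ _).mpr
            ((PySem.Chars.isIn_iff_infix _ _).mpr hinf)
          have hJ : PySem.Chars.join ['\n'] [l] = l := by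
            simp [PySem.Chars.join, List.intercalate]
          rw [hJ] at hi
          match i, hi with
          | 0, hi => exact hql (by simpa [List.cons_prefix_cons] using hi)
          | (i'+1), hi =>
            have hi2 : ('\n'::q) <+: l.drop i' := by simpa using hi
            rcases hdl : l.drop i' with _ | ⟨a, y⟩
            · rw [hdl] at hi2; simp at hi2
            · rw [hdl] at hi2
              have ha : a ∈ l := List.drop_subset i' l (by rw [hdl]; simp)
              exact pvNoPrefix_head a y q (fun haeq => hl (haeq ▸ ha)) hi2
        · -- at least two lines
          have hJc := pvJoin_cons l ls' hls'
          -- no occurrence can start inside the first line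
          have hmid : ∀ i, i ≤ l.length →
              ¬ ('\n' :: q) <+: ('\n' :: PySem.Chars.join ['\n'] (l :: ls')).drop i := by
            intro i hile hi
            rw [hJc] at hi
            match i, hi with
            | 0, hi =>
              have : q <+: l ++ '\n' :: PySem.Chars.join ['\n'] ls' := by
                simpa [List.cons_prefix_cons] using hi
              exact hql (pvPrefix_append_line q l _ hqn this)
            | (i'+1), hi =>
              have hi2 : ('\n'::q) <+: l.drop i' ++ '\n' :: PySem.Chars.join ['\n'] ls' := by
                rw [← List.drop_append_of_le_length (by omega)]
                simpa using hi
              rcases hdl : l.drop i' with _ | ⟨a, y⟩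
              · have : l.length ≤ i' := by simpa [List.drop_eq_nil_iff] using hdl
                omega
              · rw [hdl] at hi2
                have ha : a ∈ l := List.drop_subset i' l (by rw [hdl]; simp)
                exact pvNoPrefix_head a _ q (fun haeq => hl (haeq ▸ ha)) (by simpa using hi2)
          -- occurrences past the first line are occurrences in the tail
          have hshift : ∀ d, ('\n' :: PySem.Chars.join ['\n'] (l :: ls')).drop (l.length + 1 + d)
              = ('\n' :: PySem.Chars.join ['\n'] ls').drop d := by
            intro d
            have e : l.length + 1 + d = (l.length + d) + 1 := by omega
            rw [hJc, e, List.drop_succ_cons]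
            exact List.drop_length_add_append d
          rcases ih hnl' with ⟨hk', hnone'⟩ | ⟨m', hm', hq', hmin', hpos', htake', hdrop'⟩
          · left
            refine ⟨?_, ?_⟩
            · rw [PySem.Chars.find_eq_neg_one_iff]
              intro hinf
              obtain ⟨i, hi⟩ := (PySem.Chars.exists_prefix_drop_iff_isIn _ _).mpr
                ((PySem.Chars.isIn_iff_infix _ _).mpr hinf)
              rcases le_or_gt i l.length with hile | higt
              · exact hmid i hile hi
              · obtain ⟨d, rfl⟩ : ∃ d, i = l.length + 1 + d := ⟨i - l.length - 1, by omega⟩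
                rw [hshift d] at hi
                exact pvFind_none _ _ hk' d hi
            · intro x hx
              rcases List.mem_cons.mp hx with rfl | hx'
              · exact hql
              · exact hnone' x hx'
          · -- the recursive find hits line m' ⇒ whole find hits line m'+1
            right
            set f' := PySem.Chars.find ('\n' :: PySem.Chars.join ['\n'] ls') ('\n' :: q) with hf'
            obtain ⟨hpre', hmin''⟩ := PySem.Chars.find_spec hpos'
            have hfind : PySem.Chars.find ('\n' :: PySem.Chars.join ['\n'] (l :: ls')) ('\n' :: q)
                = ((l.length + 1 + f'.toNat : Nat) : Int) := by
              apply pvFind_eq_of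
              · rw [hshift f'.toNat]; exact hpre'
              · intro i hilt hi
                rcases le_or_gt i l.length with hile | higt
                · exact hmid i hile hi
                · obtain ⟨d, rfl⟩ : ∃ d, i = l.length + 1 + d := ⟨i - l.length - 1, by omega⟩
                  rw [hshift d] at hi
                  exact hmin'' d (by omega) hi
            refine ⟨m' + 1, by simpa using Nat.succ_lt_succ hm', by simpa using hq', ?_, ?_, ?_, ?_⟩
            · intro i hi hlt
              match i, hi, hlt with
              | 0, _, _ => simpa using hql
              | (i'+1), hi, hlt => simpa using hmin' i' (by simpa using hi) (by omega)
            · rw [hfind]; exact Int.natCast_nonneg _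
            · rw [hfind]
              simp only [Nat.succ_ne_zero, if_false, Int.toNat_natCast]
              rw [hJc]
              show ('\n' :: (l ++ '\n' :: PySem.Chars.join ['\n'] ls')).take (l.length + 1 + f'.toNat) = _
              have : ('\n' :: (l ++ '\n' :: PySem.Chars.join ['\n'] ls')).take (l.length + 1 + f'.toNat)
                  = '\n' :: (l ++ '\n' :: PySem.Chars.join ['\n'] ls').take (l.length + f'.toNat) := by
                have : l.length + 1 + f'.toNat = (l.length + f'.toNat) + 1 := by omega
                rw [this, List.take_succ_cons]
              rw [this, List.take_length_add_append]
              rcases Nat.eq_zero_or_pos m' with rfl | hm'pos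
              · simp only [reduceIte] at htake'
                rw [htake']
                have : (l :: ls').take 1 = [l] := by simp
                rw [this]
                simp [PySem.Chars.join, List.intercalate]
              · rw [if_neg (by omega)] at htake'
                rw [htake']
                have htne : ls'.take m' ≠ [] := by
                  intro h0
                  rcases List.take_eq_nil_iff.mp h0 with h | h
                  · omega
                  · exact hls' h
                rw [List.take_succ_cons, pvJoin_cons _ _ htne]
            · rw [hfind]
              simp only [Int.toNat_natCast]
              rw [hshift f'.toNat, hdrop']
              simp
theorem pvLoopA_false_none (ls : List (List Char)) (h : ∀ l ∈ ls, ¬ "# ".toList <+: l) :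
    pvLoopA ls false = [] := by
  induction ls with
  | nil => rfl
  | cons l rest ih =>
      have : PySem.Chars.startswith l "# ".toList = false := by
        rw [← Bool.not_eq_true, PySem.Chars.startswith_iff]; exact h l (by simp)
      have this2 : PySem.Chars.startswith l ['#', ' '] = false := by simpa using this
      simp [pvLoopA, this2, ih (fun x hx => h x (by simp [hx]))]

theorem pvLoopA_false_at (m : Nat) : ∀ (ls : List (List Char)), ∀ hm : m < ls.length,
    "# ".toList <+: ls[m] → (∀ i, ∀ hi : i < ls.length, i < m → ¬ "# ".toList <+: ls[i]) →
    pvLoopA ls false = pvLoopA (ls.drop (m + 1)) true := by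
  induction m with
  | zero =>
      intro ls hm hq _
      match ls, hm with
      | l :: rest, _ =>
        have : PySem.Chars.startswith l "# ".toList = true :=
          (PySem.Chars.startswith_iff _ _).mpr (by simpa using hq)
        have this2 : PySem.Chars.startswith l ['#', ' '] = true := by simpa using this
        simp [pvLoopA, this2]
  | succ n ih =>
      intro ls hm hq hmin
      match ls, hm with
      | l :: rest, hm =>
        have h0 : ¬ "# ".toList <+: l := hmin 0 (by simp) (by omega)
        have : PySem.Chars.startswith l "# ".toList = false := by
          rw [← Bool.not_eq_true, PySem.Chars.startswith_iff]; exact h0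
        simp only [pvLoopA, this, Bool.false_eq_true, if_false, List.drop_succ_cons]
        exact ih rest (by simpa using hm) (by simpa using hq)
          (fun i hi hlt => by simpa using hmin (i+1) (by simpa using Nat.succ_lt_succ hi) (by omega))

theorem pvLoopA_true_none (ls : List (List Char)) (h : ∀ l ∈ ls, ¬ "## ".toList <+: l) :
    pvLoopA ls true = ls := by
  induction ls with
  | nil => rfl
  | cons l rest ih =>
      have : PySem.Chars.startswith l "## ".toList = false := by
        rw [← Bool.not_eq_true, PySem.Chars.startswith_iff]; exact h l (by simp)
      have this2 : PySem.Chars.startswith l ['#', '#', ' '] = false := by simpa using this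
      simp [pvLoopA, this2, ih (fun x hx => h x (by simp [hx]))]

theorem pvLoopA_true_at (m : Nat) : ∀ (ls : List (List Char)), ∀ hm : m < ls.length,
    "## ".toList <+: ls[m] → (∀ i, ∀ hi : i < ls.length, i < m → ¬ "## ".toList <+: ls[i]) →
    pvLoopA ls true = ls.take m := by
  induction m with
  | zero =>
      intro ls hm hq _
      match ls, hm with
      | l :: rest, _ =>
        have : PySem.Chars.startswith l "## ".toList = true :=
          (PySem.Chars.startswith_iff _ _).mpr (by simpa using hq)
        have this2 : PySem.Chars.startswith l ['#', '#', ' '] = true := by simpa using this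
        simp [pvLoopA, this2]
  | succ n ih =>
      intro ls hm hq hmin
      match ls, hm with
      | l :: rest, hm =>
        have h0 : ¬ "## ".toList <+: l := hmin 0 (by simp) (by omega)
        have : PySem.Chars.startswith l "## ".toList = false := by
          rw [← Bool.not_eq_true, PySem.Chars.startswith_iff]; exact h0
        simp only [pvLoopA, this, Bool.false_eq_true, if_false, List.take_succ_cons]
        rw [ih rest (by simpa using hm) (by simpa using hq)
          (fun i hi hlt => by simpa using hmin (i+1) (by simpa using Nat.succ_lt_succ hi) (by omega))]

theorem pvStrip_cons_nl (x : List Char) :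
    PySem.Chars.strip ('\n' :: x) = PySem.Chars.strip x := by
  simp [PySem.Chars.strip, PySem.Chars.lstrip,
    show PySem.Chars.isspace '\n' = true from by decide]

-- phase 2: cutting '\n'::join ls at the first "\n## " and stripping = stripping A's body loop
theorem pvPhase2 (ls : List (List Char)) (h : ∀ l ∈ ls, '\n' ∉ l) :
    PySem.Chars.strip
      (if PySem.Chars.find ('\n' :: PySem.Chars.join ['\n'] ls) "\n## ".toList = -1
       then '\n' :: PySem.Chars.join ['\n'] ls
       else ('\n' :: PySem.Chars.join ['\n'] ls).take
              (PySem.Chars.find ('\n' :: PySem.Chars.join ['\n'] ls) "\n## ".toList).toNat)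
    = PySem.Chars.strip (PySem.Chars.join ['\n'] (pvLoopA ls true)) := by
  have hpat : "\n## ".toList = '\n' :: "## ".toList := rfl
  rw [hpat]
  rcases pvFindChar "## ".toList (by decide) (by decide) ls h with
    ⟨hk, hnone⟩ | ⟨m, hm, hqm, hmin, hpos, htake, hdrop⟩
  · rw [if_pos hk, pvLoopA_true_none ls hnone, pvStrip_cons_nl]
  · have hne : ¬ PySem.Chars.find ('\n' :: PySem.Chars.join ['\n'] ls) ('\n' :: "## ".toList) = -1 := by
      omega
    rw [if_neg hne, htake, pvLoopA_true_at m ls hm hqm hmin]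
    rcases Nat.eq_zero_or_pos m with rfl | hmpos
    · simp [PySem.Chars.join, List.intercalate]
    · rw [if_neg (by omega), pvStrip_cons_nl]

-- ===== VERDICT (by name: the statement is the Claim_ definition above) =====
theorem read_todo_description_spec : Claim_equal_read_todo_description := by
  intro text _
  unfold Spec_read_todo_description
  by_cases ht : text = ""
  · subst ht; rfl
  · simp only [read_todo_description, read_todo_description_alt, if_neg ht]
    have hpat : "\n# ".toList = '\n' :: "# ".toList := rfl
    set L := PySem.Chars.splitlines text.toList with hL
    have hnl : ∀ l ∈ L, '\n' ∉ l := pvSplitlines_nonl text.toList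
    rw [hpat]
    rcases pvFindChar "# ".toList (by decide) (by decide) L hnl with
      ⟨hk, hnone⟩ | ⟨m, hm, hqm, hmin, hpos, htake, hdrop⟩
    · rw [if_pos hk, pvLoopA_false_none L hnone]
      rfl
    · have hne : ¬ PySem.Chars.find ('\n' :: PySem.Chars.join ['\n'] L) ('\n' :: "# ".toList) = -1 := by
        omega
      rw [if_neg hne]
      set i := PySem.Chars.find ('\n' :: PySem.Chars.join ['\n'] L) ('\n' :: "# ".toList) with hi
      obtain ⟨r, hr⟩ := id hqm
      have hLm : L[m] = '#' :: ' ' :: r := by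
        rw [← hr]; rfl
      have hdm : L.drop m = ('#' :: ' ' :: r) :: L.drop (m+1) := by
        rw [List.drop_eq_getElem_cons hm, hLm]
      have hrnl : '\n' ∉ r := by
        intro hmem
        exact hnl L[m] (List.getElem_mem hm) (by rw [hLm]; simp [hmem])
      have hD : ∀ x ∈ L.drop (m+1), '\n' ∉ x := fun x hx => hnl x (List.drop_subset _ _ hx)
      have hdrop3 : ('\n' :: PySem.Chars.join ['\n'] L).drop (i.toNat + 3)
          = (PySem.Chars.join ['\n'] (L.drop m)).drop 2 := by
        have e : ('\n' :: PySem.Chars.join ['\n'] L).drop (i.toNat + 3)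
            = (('\n' :: PySem.Chars.join ['\n'] L).drop i.toNat).drop 3 := by
          rw [List.drop_drop]
        rw [e, hdrop]
        rfl
      rw [hdrop3, hdm]
      rcases eq_or_ne (L.drop (m+1)) [] with hDnil | hDne
      · -- the '# ' heading is the last line
        rw [hDnil]
        have hJ1 : PySem.Chars.join ['\n'] [('#' :: ' ' :: r)] = '#' :: ' ' :: r := by
          simp [PySem.Chars.join, List.intercalate]
        rw [hJ1]
        have hfr : PySem.Chars.find r ['\n'] = -1 := by
          rw [PySem.Chars.find_eq_neg_one_iff]
          intro hinf
          exact hrnl ((List.singleton_infix_iff '\n' r).mp hinf)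
        simp only [List.drop_succ_cons, List.drop_zero, hfr, reduceIte]
        have h2 := pvPhase2 (L.drop (m+1)) hD
        rw [hDnil] at h2
        have hA := pvLoopA_false_at m L hm hqm hmin
        rw [hA, hDnil]
        have : ('\n' : Char) :: PySem.Chars.join ['\n'] ([] : List (List Char)) = ['\n'] := rfl
        rw [← this] at *
        exact congrArg String.ofList h2.symm
      · -- more lines follow the heading
        rw [pvJoin_cons _ _ hDne]
        have hdrop2 : (('#' :: ' ' :: r) ++ '\n' :: PySem.Chars.join ['\n'] (L.drop (m+1))).drop 2
            = r ++ '\n' :: PySem.Chars.join ['\n'] (L.drop (m+1)) := rfl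
        rw [hdrop2]
        have hfr : PySem.Chars.find (r ++ '\n' :: PySem.Chars.join ['\n'] (L.drop (m+1))) ['\n']
            = ((r.length : Nat) : Int) := by
          apply pvFind_eq_of
          · rw [List.drop_left]
            simp
          · intro j hj hpre
            have hp2 : ['\n'] <+: r.drop j ++ '\n' :: PySem.Chars.join ['\n'] (L.drop (m+1)) := by
              rw [← List.drop_append_of_le_length (by omega)]
              exact hpre
            rcases hdl : r.drop j with _ | ⟨a, y⟩
            · have : r.length ≤ j := by simpa [List.drop_eq_nil_iff] using hdl
              omega
            · rw [hdl] at hp2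
              have ha : a ∈ r := List.drop_subset j r (by rw [hdl]; simp)
              exact pvNoPrefix_head a (y ++ '\n' :: PySem.Chars.join ['\n'] (List.drop (m+1) L)) [] (fun haeq => hrnl (haeq ▸ ha)) (by simpa using hp2)
        rw [hfr]
        have hfne : ¬ ((r.length : Nat) : Int) = -1 := by omega
        rw [if_neg hfne]
        have hbody : (r ++ '\n' :: PySem.Chars.join ['\n'] (L.drop (m+1))).drop
            (((r.length : Nat) : Int).toNat + 1) = PySem.Chars.join ['\n'] (L.drop (m+1)) := by
          simp only [Int.toNat_natCast]
          exact List.drop_length_add_append (l₁ := r) (l₂ := '\n' :: PySem.Chars.join ['\n'] (L.drop (m+1))) 1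
        rw [hbody]
        have hA := pvLoopA_false_at m L hm hqm hmin
        rw [hA]
        exact congrArg String.ofList (pvPhase2 (L.drop (m+1)) hD).symm
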